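-- pv_equiv track=rewrite | github.com/yasmineseidu/yasmines-team | app/backend/src/agents/research_export/docs_builder.py | enhance_formatting
-- ===== SOURCE A (Python) =====
-- def enhance_formatting(content: str) -> str:
--     """
--     Enhance document formatting for professional appearance.
--
--     Args:
--         content: Raw content
--
--     Returns:
--         Enhanced content
--     """
--     # Ensure proper spacing after headers
--     lines = content.split("\n")
--     enhanced = []
--
--     for i, line in enumerate(lines):
--         enhanced.append(line)
--
--         # Add extra space after headers
--         if line.startswith("#") and i < len(lines) - 1 and lines[i + 1].strip() != "":
--             enhanced.append("")
--
--     return "\n".join(enhanced)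
-- ===== SOURCE B (Python) =====
-- def enhance_formatting(content: str) -> str:
--     """Single streaming state machine over the characters (no line splitting):
--     after a '#'-header line's newline we go 'pending', buffering the next line's
--     leading whitespace; the first non-whitespace character proves the line
--     non-blank and flushes an inserted blank line before it."""
--     out = []
--     buf = []          # withheld leading whitespace of the line after a header
--     pending = False   # previous line was a header; awaiting a non-blank char
--     linestart = True
--     header = False
--     for ch in content:
--         if linestart:
--             header = ch == "#"
--             linestart = False
--         if ch == "\n":
--             out.extend(buf)
--             buf = []
--             out.append("\n")
--             pending = header
--             linestart = True
--         elif pending: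
--             if ch in " \t\r\x0b\x0c":
--                 buf.append(ch)
--             else:
--                 out.append("\n")
--                 out.extend(buf)
--                 buf = []
--                 out.append(ch)
--                 pending = False
--         else:
--             out.append(ch)
--     out.extend(buf)
--     return "".join(out)
-- ===== Notes on version B (the rewrite author's own statement) =====
-- stated objective: alternative
-- what changed: Replaces A's split-into-lines plus index-lookahead loop by a single character-level state machine that streams the text once, buffering a pending line's leading whitespace and flushing an inserted newline at the first non-whitespace character.
import Mathlib
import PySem

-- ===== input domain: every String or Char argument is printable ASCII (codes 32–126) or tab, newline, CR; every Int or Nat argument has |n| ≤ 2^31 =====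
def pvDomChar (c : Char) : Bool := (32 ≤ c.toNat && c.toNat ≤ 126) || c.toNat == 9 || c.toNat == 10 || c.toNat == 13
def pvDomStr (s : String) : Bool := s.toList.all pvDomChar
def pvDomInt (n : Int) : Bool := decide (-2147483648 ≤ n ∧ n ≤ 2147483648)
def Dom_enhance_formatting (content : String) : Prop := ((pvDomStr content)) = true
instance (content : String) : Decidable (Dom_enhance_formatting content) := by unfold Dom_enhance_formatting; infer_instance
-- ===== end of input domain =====

-- B replaces A's split/index-lookahead loop over lines by a single character-level
-- state machine (buffered pending insertion); same cost, different algorithm.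

-- ===== PORT A =====
-- 'content.split("\n")': sep is the nonempty literal "\n", so split? is always `some`; getD [] is exact.
-- 'lines[i + 1]': guarded by 'i < len(lines) - 1' (short-circuit 'and'), so pyGetD's default is never used.
def enhance_formatting (content : String) : String :=
  let lines := (PySem.Str.split? content "\n").getD []
  let enhanced : List String :=
    (PySem.List.enumerate lines).foldl
      (fun acc p =>
        let acc' := acc ++ [p.2]
        if PySem.Str.startswith p.2 "#" && decide (p.1 < (lines.length : Int) - 1)
             && (PySem.Str.strip (PySem.List.pyGetD lines (p.1 + 1) "") != "")
        then acc' ++ [""] else acc')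
      []
  PySem.Str.join "\n" enhanced

-- ===== PORT B =====
-- B's "ch in \" \t\r\x0b\x0c\"" membership test
def pvWsB (c : Char) : Bool :=
  decide (c = ' ') || decide (c = '\t') || decide (c = '\r') ||
  decide (c = '\x0b') || decide (c = '\x0c')

-- the body of B's 'for ch in content' loop; state = (out, buf, pending, linestart, header)
def pvStepB (st : List Char × List Char × Bool × Bool × Bool) (ch : Char) :
    List Char × List Char × Bool × Bool × Bool :=
  let out := st.1
  let buf := st.2.1
  let pending := st.2.2.1
  let linestart := st.2.2.2.1
  let header := if linestart then decide (ch = '#') else st.2.2.2.2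
  if ch = '\n' then (out ++ buf ++ ['\n'], [], header, true, header)
  else if pending then
    if pvWsB ch then (out, buf ++ [ch], pending, false, header)
    else (out ++ '\n' :: (buf ++ [ch]), [], false, false, header)
  else (out ++ [ch], buf, pending, false, header)

-- '"".join(out)' over single characters = String.ofList; 'out.extend(buf)' at the end
def enhance_formatting_alt (content : String) : String :=
  let fin := content.toList.foldl pvStepB ([], [], false, true, false)
  String.ofList (fin.1 ++ fin.2.1)

-- ===== PRECONDITION & SPEC =====
def Spec_enhance_formatting (content : String) (out : String) : Prop := out = enhance_formatting_alt content
instance (content : String) (out : String) : Decidable (Spec_enhance_formatting content out) := by unfold Spec_enhance_formatting; infer_instance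

-- ===== CLAIM (what is proved, stated in full; the proofs are below) =====
def Claim_equal_enhance_formatting : Prop := ∀ (content : String), Dom_enhance_formatting content → Spec_enhance_formatting content (enhance_formatting content)

-- ===== LEMMAS AND PROOFS =====

-- structural form of A's enhanced list
def pvSpecA : List String → List String
  | [] => []
  | [l] => [l]
  | l :: m :: rest =>
      l :: ((if PySem.Str.startswith l "#" && (PySem.Str.strip m != "") then [""] else []) ++ pvSpecA (m :: rest))

lemma pvSpecA_ne_nil (L : List String) (h : L ≠ []) : pvSpecA L ≠ [] := by
  match L with
  | [l] => simp [pvSpecA]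
  | l :: m :: rest => simp [pvSpecA]

-- A's index-lookahead condition, read structurally on the suffix
lemma pvA_flatMap (L : List String) : ∀ (suf : List String) (s : Nat), L.drop s = suf →
    (PySem.List.enumerate suf (s : Int)).flatMap
      (fun p => p.2 :: (if PySem.Str.startswith p.2 "#" && decide (p.1 < (L.length : Int) - 1)
             && (PySem.Str.strip (PySem.List.pyGetD L (p.1 + 1) "") != "") then [""] else []))
      = pvSpecA suf := by
  intro suf
  induction suf with
  | nil => intro s h; simp [PySem.List.enumerate, pvSpecA]
  | cons l suf' ih =>
    intro s h
    have hs1 : L.drop (s + 1) = suf' := by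
      have h1 := congrArg (List.drop 1) h
      rw [List.drop_drop] at h1
      simpa using h1
    rw [PySem.List.enumerate_cons, List.flatMap_cons]
    cases suf' with
    | nil =>
      have hlen : L.length ≤ s + 1 := List.drop_eq_nil_iff.mp hs1
      have hcond : decide ((s : Int) < (L.length : Int) - 1) = false := by
        simp only [decide_eq_false_iff_not, not_lt]
        omega
      simp [hcond, pvSpecA, PySem.List.enumerate]
    | cons m rest =>
      have hlen : s + 1 < L.length := by
        by_contra hle
        have hd : L.drop (s + 1) = [] := List.drop_eq_nil_iff.mpr (by omega)
        rw [hs1] at hd; simp at hd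
      have hcond : decide ((s : Int) < (L.length : Int) - 1) = true := by
        simp only [decide_eq_true_eq]
        omega
      have hget : PySem.List.pyGetD L ((s + 1 : Nat) : Int) "" = m := by
        rw [PySem.List.pyGetD_natCast, List.getD_eq_getElem?_getD]
        have h0 : (L.drop (s + 1))[0]? = some m := by rw [hs1]; rfl
        rw [List.getElem?_drop] at h0
        simp [h0]
      have ihs := ih (s + 1) hs1
      have hc1 : ((s : Int) + 1) = ((s + 1 : Nat) : Int) := by push_cast; ring
      simp only [hcond, Bool.and_true, hc1, hget, ihs, pvSpecA, List.cons_append]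

-- join over a cons with nonempty tail
lemma pvJoin_cons_of_ne_nil (sep p : List Char) (rest : List (List Char)) (h : rest ≠ []) :
    PySem.Chars.join sep (p :: rest) = p ++ sep ++ PySem.Chars.join sep rest := by
  match rest with
  | q :: rest' => exact PySem.Chars.join_cons_cons sep p q rest'

-- ---- structural characterisation of content.split("\n") ----
def pvSplit (pre : List Char) : List Char → List (List Char)
  | [] => [pre]
  | c :: rest => if c = '\n' then pre :: pvSplit [] rest else pvSplit (pre ++ [c]) rest

lemma pvGo_eq : ∀ (fuel : Nat) (l : List Char), l.length < fuel → ∀ (pre : List Char) (acc : List (List Char)),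
    PySem.Chars.splitOn.go ['\n'] fuel l pre.reverse acc = acc.reverse ++ pvSplit pre l := by
  intro fuel
  induction fuel with
  | zero => intro l h; omega
  | succ n ih =>
    intro l h pre acc
    cases l with
    | nil => simp [PySem.Chars.splitOn.go, pvSplit]
    | cons c rest =>
      unfold PySem.Chars.splitOn.go
      by_cases hc : c = '\n'
      · subst hc
        have hpre : List.isPrefixOf ['\n'] ('\n' :: rest) = true := by simp [List.isPrefixOf]
        rw [if_pos hpre]
        have := ih rest (by simpa using h) [] (pre :: acc)
        simp only [List.reverse_nil] at this
        simp [this, pvSplit]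
      · have hpre : List.isPrefixOf ['\n'] (c :: rest) = false := by
          simp only [List.isPrefixOf, Bool.and_true, beq_eq_false_iff_ne, ne_eq]
          exact fun h => hc h.symm
        rw [if_neg (by simp [hpre])]
        have := ih rest (by simpa using h) (pre ++ [c]) acc
        simp only [List.reverse_append, List.reverse_singleton, List.singleton_append] at this
        simp [this, pvSplit, hc]

lemma pvSplitOn_eq (s : List Char) : PySem.Chars.splitOn s ['\n'] = pvSplit [] s := by
  have := pvGo_eq (s.length + 1) s (by omega) [] []
  simpa [PySem.Chars.splitOn] using this

lemma pvSplit_ne_nil (pre l : List Char) : pvSplit pre l ≠ [] := by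
  induction l generalizing pre with
  | nil => simp [pvSplit]
  | cons c rest ih =>
    by_cases hc : c = '\n' <;> simp [pvSplit, hc, ih]

lemma pvSplit_join (pre l : List Char) :
    PySem.Chars.join ['\n'] (pvSplit pre l) = pre ++ l := by
  induction l generalizing pre with
  | nil => simp [pvSplit, PySem.Chars.join_singleton]
  | cons c rest ih =>
    by_cases hc : c = '\n'
    · subst hc
      rw [show pvSplit pre ('\n' :: rest) = pre :: pvSplit [] rest from by simp [pvSplit]]
      rw [pvJoin_cons_of_ne_nil _ _ _ (pvSplit_ne_nil _ _), ih]
      simp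
    · rw [show pvSplit pre (c :: rest) = pvSplit (pre ++ [c]) rest from by simp [pvSplit, hc]]
      rw [ih]
      simp

lemma pvSplit_no_nl (pre l : List Char) (hpre : '\n' ∉ pre) :
    ∀ line ∈ pvSplit pre l, '\n' ∉ line := by
  induction l generalizing pre with
  | nil => simpa [pvSplit] using hpre
  | cons c rest ih =>
    by_cases hc : c = '\n'
    · subst hc
      intro line hl
      rw [show pvSplit pre ('\n' :: rest) = pre :: pvSplit [] rest from by simp [pvSplit]] at hl
      rcases List.mem_cons.mp hl with rfl | hl
      · exact hpre
      · exact ih [] (by simp) line hl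
    · intro line hl
      simp only [pvSplit, if_neg hc] at hl
      exact ih (pre ++ [c]) (by simp [hpre, Ne.symm hc]) line hl

lemma pvSplit_mem_sub (pre l : List Char) :
    ∀ line ∈ pvSplit pre l, ∀ c ∈ line, c ∈ pre ∨ c ∈ l := by
  induction l generalizing pre with
  | nil =>
    intro line hl c hc
    simp only [pvSplit, List.mem_singleton] at hl
    subst hl; exact Or.inl hc
  | cons d rest ih =>
    intro line hl c hc
    by_cases hd : d = '\n'
    · subst hd
      rw [show pvSplit pre ('\n' :: rest) = pre :: pvSplit [] rest from by simp [pvSplit]] at hl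
      rcases List.mem_cons.mp hl with rfl | hl
      · exact Or.inl hc
      · rcases ih [] line hl c hc with h | h
        · simp at h
        · exact Or.inr (List.mem_cons_of_mem _ h)
    · simp only [pvSplit, if_neg hd] at hl
      rcases ih (pre ++ [d]) line hl c hc with h | h
      · rcases List.mem_append.mp h with h | h
        · exact Or.inl h
        · simp only [List.mem_singleton] at h; subst h
          exact Or.inr (List.mem_cons_self)
      · exact Or.inr (List.mem_cons_of_mem _ h)

-- ---- common line-level specification ----
def pvNb (l : List Char) : Bool := !l.all pvWsB

def pvSh (l : List Char) : Bool := decide (l.head? = some '#')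

def pvE (p : Bool) (l : List Char) : List Char := if p && pvNb l then '\n' :: l else l

def pvSpecB (p : Bool) : List (List Char) → List Char
  | [] => []
  | [l] => pvE p l
  | l :: m :: rest => pvE p l ++ '\n' :: pvSpecB (pvSh l) (m :: rest)

lemma pvSpecB_pend (p : Bool) (m : List Char) (rest : List (List Char)) :
    pvSpecB p (m :: rest) = (if p && pvNb m then ['\n'] else []) ++ pvSpecB false (m :: rest) := by
  cases rest with
  | nil => simp [pvSpecB, pvE]; split <;> simp_all
  | cons q t => simp only [pvSpecB, pvE, Bool.false_and]; split <;> simp_all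

-- ---- B's fold, line by line ----
lemma pvFold_nopend (l : List Char) (h : '\n' ∉ l) (o buf : List Char) (h0 : Bool) :
    l.foldl pvStepB (o, buf, false, false, h0) = (o ++ l, buf, false, false, h0) := by
  induction l generalizing o with
  | nil => simp
  | cons c rest ih =>
    have hc : ¬ c = '\n' := fun hh => h (hh ▸ List.mem_cons_self)
    rw [List.foldl_cons, show pvStepB (o, buf, false, false, h0) c = (o ++ [c], buf, false, false, h0) from by
      simp [pvStepB, hc]]
    rw [ih (fun hm => h (List.mem_cons_of_mem _ hm))]
    simp

lemma pvFold_pend (l : List Char) (h : '\n' ∉ l) (o buf : List Char) (h0 : Bool) :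
    l.foldl pvStepB (o, buf, true, false, h0) =
      if l.all pvWsB then (o, buf ++ l, true, false, h0)
      else (o ++ '\n' :: (buf ++ l), [], false, false, h0) := by
  induction l generalizing o buf with
  | nil => simp
  | cons c rest ih =>
    have hc : ¬ c = '\n' := fun hh => h (hh ▸ List.mem_cons_self)
    have hrest : '\n' ∉ rest := fun hm => h (List.mem_cons_of_mem _ hm)
    by_cases hw : pvWsB c
    · rw [List.foldl_cons, show pvStepB (o, buf, true, false, h0) c = (o, buf ++ [c], true, false, h0) from by
        simp [pvStepB, hc, hw]]
      rw [ih hrest]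
      simp [hw]
    · rw [List.foldl_cons, show pvStepB (o, buf, true, false, h0) c = (o ++ '\n' :: (buf ++ [c]), [], false, false, h0) from by
        simp [pvStepB, hc, hw]]
      rw [pvFold_nopend rest hrest]
      simp [hw]

lemma pvFold_line (l : List Char) (h : '\n' ∉ l) (o : List Char) (p h0 : Bool) :
    (l ++ ['\n']).foldl pvStepB (o, [], p, true, h0)
      = (o ++ pvE p l ++ ['\n'], [], pvSh l, true, pvSh l) := by
  cases l with
  | nil =>
    cases p <;> rfl
  | cons c l' =>
    have hc : ¬ c = '\n' := fun hh => h (hh ▸ List.mem_cons_self)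
    have hl' : '\n' ∉ l' := fun hm => h (List.mem_cons_of_mem _ hm)
    rw [List.cons_append, List.foldl_cons]
    cases p with
    | false =>
      rw [show pvStepB (o, [], false, true, h0) c = (o ++ [c], [], false, false, decide (c = '#')) from by
        simp [pvStepB, hc]]
      rw [List.foldl_append, pvFold_nopend l' hl']
      simp [pvStepB, pvE, pvSh]
    | true =>
      by_cases hw : pvWsB c
      · have hch : ¬ c = '#' := by
          rintro rfl; simp [pvWsB] at hw
        rw [show pvStepB (o, [], true, true, h0) c = (o, [c], true, false, false) from by
          simp [pvStepB, hc, hw, hch]]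
        rw [List.foldl_append, pvFold_pend l' hl']
        by_cases hall : l'.all pvWsB
        · simp [hall, pvStepB, pvE, pvNb, hw, pvSh, hch]
        · simp [hall, pvStepB, pvE, pvNb, hw, pvSh, hch]
      · rw [show pvStepB (o, [], true, true, h0) c = (o ++ '\n' :: [c], [], false, false, decide (c = '#')) from by
          simp [pvStepB, hc, hw]]
        rw [List.foldl_append, pvFold_nopend l' hl']
        simp [pvStepB, pvE, pvNb, hw, pvSh]

lemma pvFold_last (l : List Char) (h : '\n' ∉ l) (o : List Char) (p h0 : Bool) :
    (l.foldl pvStepB (o, [], p, true, h0)).1 ++ (l.foldl pvStepB (o, [], p, true, h0)).2.1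
      = o ++ pvE p l := by
  cases l with
  | nil => simp [pvE, pvNb]
  | cons c l' =>
    have hc : ¬ c = '\n' := fun hh => h (hh ▸ List.mem_cons_self)
    have hl' : '\n' ∉ l' := fun hm => h (List.mem_cons_of_mem _ hm)
    rw [List.foldl_cons]
    cases p with
    | false =>
      rw [show pvStepB (o, [], false, true, h0) c = (o ++ [c], [], false, false, decide (c = '#')) from by
        simp [pvStepB, hc]]
      rw [pvFold_nopend l' hl']
      simp [pvE]
    | true =>
      by_cases hw : pvWsB c
      · rw [show pvStepB (o, [], true, true, h0) c = (o, [c], true, false, decide (c = '#')) from by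
          simp [pvStepB, hc, hw]]
        rw [pvFold_pend l' hl']
        by_cases hall : l'.all pvWsB
        · simp [hall, pvE, pvNb, hw]
        · simp [hall, pvE, pvNb, hw]
      · rw [show pvStepB (o, [], true, true, h0) c = (o ++ '\n' :: [c], [], false, false, decide (c = '#')) from by
          simp [pvStepB, hc, hw]]
        rw [pvFold_nopend l' hl']
        simp [pvE, pvNb, hw]

lemma pvFold_join (LL : List (List Char)) (hnl : ∀ line ∈ LL, '\n' ∉ line)
    (o : List Char) (p h0 : Bool) (hne : LL ≠ []) :
    ((PySem.Chars.join ['\n'] LL).foldl pvStepB (o, [], p, true, h0)).1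
      ++ ((PySem.Chars.join ['\n'] LL).foldl pvStepB (o, [], p, true, h0)).2.1
      = o ++ pvSpecB p LL := by
  induction LL generalizing o p h0 with
  | nil => exact absurd rfl hne
  | cons l rest ih =>
    cases rest with
    | nil =>
      rw [PySem.Chars.join_singleton]
      exact pvFold_last l (hnl l (List.mem_cons_self)) o p h0
    | cons m t =>
      rw [pvJoin_cons_of_ne_nil _ _ _ (by simp)]
      rw [show l ++ ['\n'] ++ PySem.Chars.join ['\n'] (m :: t)
            = (l ++ ['\n']) ++ PySem.Chars.join ['\n'] (m :: t) from rfl]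
      rw [List.foldl_append, pvFold_line l (hnl l List.mem_cons_self) o p h0]
      rw [ih (fun line hl => hnl line (List.mem_cons_of_mem _ hl))
            (o ++ pvE p l ++ ['\n']) (pvSh l) (pvSh l) (by simp)]
      simp [pvSpecB]

-- ---- condition bridges (on the domain) ----
lemma pvWs_eq_isspace (c : Char) (hd : pvDomChar c = true) (hc : c ≠ '\n') :
    pvWsB c = PySem.Chars.isspace c := by
  have hinj : ∀ d : Char, (c = d) ↔ (c.toNat = d.toNat) := by
    intro d
    constructor
    · rintro rfl; rfl
    · intro h
      exact Char.ext (UInt32.toNat_inj.mp h)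
  have hn10 : c.toNat ≠ 10 := fun h => hc ((hinj '\n').mpr h)
  simp only [pvDomChar, Bool.or_eq_true, Bool.and_eq_true, decide_eq_true_eq, beq_iff_eq] at hd
  have e1 : (' ' : Char).toNat = 32 := rfl
  have e2 : ('\t' : Char).toNat = 9 := rfl
  have e3 : ('\r' : Char).toNat = 13 := rfl
  have e4 : ('\x0b' : Char).toNat = 11 := rfl
  have e5 : ('\x0c' : Char).toNat = 12 := rfl
  rw [Bool.eq_iff_iff]
  simp only [pvWsB, PySem.Chars.isspace, hinj, e1, e2, e3, e4, e5,
    Bool.or_eq_true, Bool.and_eq_true, decide_eq_true_eq]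
  omega

lemma pvStrip_nil_iff (m : List Char) :
    PySem.Chars.strip m = [] ↔ ∀ c ∈ m, PySem.Chars.isspace c = true := by
  constructor
  · intro h
    have hl := List.takeWhile_append_dropWhile (p := PySem.Chars.isspace) (l := m)
    have hr : (PySem.Chars.lstrip m).all PySem.Chars.isspace = true := by
      have : List.dropWhile PySem.Chars.isspace (PySem.Chars.lstrip m).reverse = [] := by
        have := congrArg List.reverse h
        simpa [PySem.Chars.strip, PySem.Chars.rstrip] using this
      have := List.dropWhile_eq_nil_iff.mp this
      simp only [List.all_eq_true]
      intro c hcm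
      exact this c (List.mem_reverse.mpr hcm)
    intro c hcm
    rcases List.mem_append.mp (hl ▸ hcm) with h1 | h2
    · exact List.mem_takeWhile_imp h1
    · exact List.all_eq_true.mp hr c h2
  · intro h
    have h1 : PySem.Chars.lstrip m = [] := List.dropWhile_eq_nil_iff.mpr h
    rw [PySem.Chars.strip, h1]
    rfl

lemma pvOfList_bne (X : List Char) : (String.ofList X != "") = !X.isEmpty := by
  cases X with
  | nil => rfl
  | cons c t =>
    have hne : String.ofList (c :: t) ≠ "" := by
      intro h
      have := congrArg String.toList h
      simp [String.toList_ofList] at this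
    simp [bne_iff_ne, hne]

lemma pvCondStrip (m : List Char) (hd : ∀ c ∈ m, pvDomChar c = true) (hnl : '\n' ∉ m) :
    (PySem.Str.strip (String.ofList m) != "") = pvNb m := by
  have hs : PySem.Str.strip (String.ofList m) = String.ofList (PySem.Chars.strip m) := by
    simp [PySem.Str.strip, String.toList_ofList]
  have hiff : PySem.Chars.strip m = [] ↔ m.all pvWsB = true := by
    rw [pvStrip_nil_iff, List.all_eq_true]
    constructor
    · intro h c hc
      rw [pvWs_eq_isspace c (hd c hc) (fun he => hnl (he ▸ hc))]
      exact h c hc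
    · intro h c hc
      rw [← pvWs_eq_isspace c (hd c hc) (fun he => hnl (he ▸ hc))]
      exact h c hc
  rw [hs, pvOfList_bne]
  by_cases hall : m.all pvWsB = true
  · have h0 : PySem.Chars.strip m = [] := hiff.mpr hall
    simp [pvNb, h0, hall]
  · have h0 : ¬ PySem.Chars.strip m = [] := fun h => hall (hiff.mp h)
    simp only [Bool.not_eq_true] at hall
    simp [pvNb, h0, hall]

lemma pvCondStart (l : List Char) :
    PySem.Str.startswith (String.ofList l) "#" = pvSh l := by
  rw [PySem.Str.startswith_eq]
  simp only [String.toList_ofList]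
  cases l with
  | nil => rfl
  | cons c t =>
    rw [Bool.eq_iff_iff, show ("#" : String).toList = ['#'] from rfl]
    simp only [PySem.Chars.startswith, List.isPrefixOf, Bool.and_true,
      beq_iff_eq, pvSh, List.head?_cons, Option.some.injEq, decide_eq_true_eq]
    exact eq_comm

-- join of A's spec equals the common spec
lemma pvJoinEq (LL : List (List Char)) (hd : ∀ line ∈ LL, ∀ c ∈ line, pvDomChar c = true)
    (hnl : ∀ line ∈ LL, '\n' ∉ line) (hne : LL ≠ []) :
    (PySem.Str.join "\n" (pvSpecA (LL.map String.ofList))).toList = pvSpecB false LL := by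
  induction LL with
  | nil => exact absurd rfl hne
  | cons l rest ih =>
    cases rest with
    | nil =>
      simp [pvSpecA, PySem.Str.join, PySem.Chars.join_singleton, String.toList_ofList,
        pvSpecB, pvE]
    | cons m t =>
      have hdm : ∀ c ∈ m, pvDomChar c = true := hd m (by simp)
      have hnlm : '\n' ∉ m := hnl m (by simp)
      have ihe := ih (fun x hx => hd x (List.mem_cons_of_mem _ hx))
        (fun x hx => hnl x (List.mem_cons_of_mem _ hx)) (by simp)
      have hcond : (PySem.Str.startswith (String.ofList l) "#"
          && (PySem.Str.strip (String.ofList m) != "")) = (pvSh l && pvNb m) := by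
        rw [pvCondStart, pvCondStrip m hdm hnlm]
      have hPP : (pvSpecA (String.ofList m :: List.map String.ofList t)).map String.toList ≠ [] := by
        simpa using pvSpecA_ne_nil (String.ofList m :: List.map String.ofList t) (by simp)
      have hJ : PySem.Chars.join ['\n']
          ((pvSpecA (String.ofList m :: List.map String.ofList t)).map String.toList)
          = pvSpecB false (m :: t) := by
        rw [← ihe, List.map_cons, PySem.Str.toList_join]
        rfl
      simp only [List.map_cons, pvSpecA, hcond]
      by_cases hc : (pvSh l && pvNb m) = true
      · rw [if_pos hc, PySem.Str.toList_join]
        simp only [List.map_cons, List.cons_append, List.nil_append, String.toList_ofList,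
          show ("\n" : String).toList = ['\n'] from rfl, show ("" : String).toList = [] from rfl]
        rw [PySem.Chars.join_cons_cons, pvJoin_cons_of_ne_nil _ _ _ hPP, hJ]
        rw [show pvSpecB false (l :: m :: t) = pvE false l ++ '\n' :: pvSpecB (pvSh l) (m :: t) from rfl]
        rw [pvSpecB_pend (pvSh l) m t, if_pos hc]
        simp [pvE]
      · rw [if_neg hc, PySem.Str.toList_join]
        simp only [List.map_cons, List.nil_append, String.toList_ofList,
          show ("\n" : String).toList = ['\n'] from rfl]
        rw [pvJoin_cons_of_ne_nil _ _ _ hPP, hJ]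
        rw [show pvSpecB false (l :: m :: t) = pvE false l ++ '\n' :: pvSpecB (pvSh l) (m :: t) from rfl]
        rw [pvSpecB_pend (pvSh l) m t, if_neg hc]
        simp [pvE]

-- ===== VERDICT (by name: the statement is the Claim_ definition above) =====
theorem enhance_formatting_spec : Claim_equal_enhance_formatting := by
  intro content hdom
  unfold Spec_enhance_formatting enhance_formatting enhance_formatting_alt
  set L := (PySem.Str.split? content "\n").getD [] with hL
  have hLmap : L = (pvSplit [] content.toList).map String.ofList := by
    rw [hL]
    have hsp : PySem.Str.split? content "\n"
        = some ((PySem.Chars.splitOn content.toList ['\n']).map String.ofList) := by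
      rw [PySem.Str.split?]
      simp [PySem.Chars.split?, show ("\n" : String).toList = ['\n'] from rfl]
    rw [hsp, Option.getD_some, pvSplitOn_eq]
  have hnl : ∀ line ∈ pvSplit [] content.toList, '\n' ∉ line :=
    pvSplit_no_nl [] content.toList (by simp)
  have hd : ∀ line ∈ pvSplit [] content.toList, ∀ c ∈ line, pvDomChar c = true := by
    intro line hl c hc
    rcases pvSplit_mem_sub [] content.toList line hl c hc with h | h
    · simp at h
    · have hall : content.toList.all pvDomChar = true := by
        have h2 := hdom
        unfold Dom_enhance_formatting pvDomStr at h2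
        exact h2
      exact List.all_eq_true.mp hall c h
  have hneLL : pvSplit [] content.toList ≠ [] := pvSplit_ne_nil [] content.toList
  have hfold :
      (PySem.List.enumerate L).foldl
        (fun acc p =>
          let acc' := acc ++ [p.2]
          if PySem.Str.startswith p.2 "#" && decide (p.1 < (L.length : Int) - 1)
               && (PySem.Str.strip (PySem.List.pyGetD L (p.1 + 1) "") != "")
          then acc' ++ [""] else acc') [] = pvSpecA L := by
    have := PySem.List.foldl_append_eq_flatMap
      (fun p : Int × String => p.2 :: (if PySem.Str.startswith p.2 "#" && decide (p.1 < (L.length : Int) - 1)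
             && (PySem.Str.strip (PySem.List.pyGetD L (p.1 + 1) "") != "") then [""] else []))
      (PySem.List.enumerate L) []
    rw [show (fun (acc : List String) (p : Int × String) =>
          let acc' := acc ++ [p.2]
          if PySem.Str.startswith p.2 "#" && decide (p.1 < (L.length : Int) - 1)
               && (PySem.Str.strip (PySem.List.pyGetD L (p.1 + 1) "") != "")
          then acc' ++ [""] else acc')
        = (fun acc p => acc ++ (p.2 :: (if PySem.Str.startswith p.2 "#" && decide (p.1 < (L.length : Int) - 1)
             && (PySem.Str.strip (PySem.List.pyGetD L (p.1 + 1) "") != "") then [""] else []))) from by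
        funext acc p
        show (if _ then (acc ++ [p.2]) ++ [""] else acc ++ [p.2]) = _
        split <;> simp]
    rw [this, List.nil_append]
    exact pvA_flatMap L L 0 (by simp)
  simp only [hfold]
  have hcontent : content.toList = PySem.Chars.join ['\n'] (pvSplit [] content.toList) := by
    rw [pvSplit_join]
    simp
  have hB := pvFold_join (pvSplit [] content.toList) hnl [] false false hneLL
  rw [← hcontent, List.nil_append] at hB
  show PySem.Str.join "\n" (pvSpecA L)
      = String.ofList ((content.toList.foldl pvStepB ([], [], false, true, false)).1
          ++ (content.toList.foldl pvStepB ([], [], false, true, false)).2.1)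
  rw [hB, ← pvJoinEq (pvSplit [] content.toList) hd hnl hneLL, ← hLmap, String.ofList_toList]
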